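-- pv_equiv track=rewrite | github.com/L-Evason/Simple-Python-String-Handling | simple-string-handling.py | alternate_character_casing
-- ===== SOURCE A (Python) =====
-- def alternate_character_casing(input_string):
--
--   # Initialise the result string
--   result_string = ""
--
--    # Flatten the input string to lowercase characters
--   input_string = input_string.lower()
--
--    # Variable to get the length of the string
--   string_tail = len(input_string)
--
--    # Loop over string with for loop.
--   for i in range(0, string_tail):
--
--     # For every even index set the char to lower case.
--     if i % 2 == 0:
--           result_string += input_string[i].lower()
--
--     # Else set the character to upper case.
--     else:
--           result_string += input_string[i].upper()
--
--   return result_string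
-- ===== SOURCE B (Python) =====
-- def alternate_character_casing(input_string):
--     # Pairwise pass: emit one lowercase+uppercase pair per step, then the leftover tail.
--     s = input_string.lower()
--     out = []
--     i = 0
--     while i + 1 < len(s):
--         out.append(s[i] + s[i + 1].upper())
--         i += 2
--     return "".join(out) + s[i:]
-- ===== Notes on version B (the rewrite author's own statement) =====
-- stated objective: simpler
-- what changed: Replaces the indexed loop with its parity branch and string accumulator by a direct pairwise recursion that emits one lowercase+uppercase pair per step.
import Mathlib
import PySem

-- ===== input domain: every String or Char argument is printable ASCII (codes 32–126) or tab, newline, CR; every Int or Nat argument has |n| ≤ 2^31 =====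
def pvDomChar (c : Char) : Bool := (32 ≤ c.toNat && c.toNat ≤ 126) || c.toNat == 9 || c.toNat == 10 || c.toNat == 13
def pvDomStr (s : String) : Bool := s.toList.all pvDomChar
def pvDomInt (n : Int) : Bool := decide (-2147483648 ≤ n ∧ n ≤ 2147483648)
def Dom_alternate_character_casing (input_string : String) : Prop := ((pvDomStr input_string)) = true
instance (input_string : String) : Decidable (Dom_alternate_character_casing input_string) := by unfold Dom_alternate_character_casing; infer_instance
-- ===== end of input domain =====

-- B replaces A's per-index parity branch with a pairwise while-loop (one lower+upper pair per step, joined, plus the leftover tail): a simpler decomposition, same cost.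

-- ===== PORT A =====
def alternate_character_casing (input_string : String) : String :=
  let s := PySem.Chars.lower input_string.toList
  let string_tail := PySem.Chars.len s
  String.ofList ((PySem.List.pyRange 0 string_tail 1).foldl
    (fun result_string i =>
      if PySem.Int.mod i 2 = 0 then
        result_string ++ [PySem.Chars.lowerChar (PySem.List.pyGetD s i ' ')]
      else
        result_string ++ [PySem.Chars.upperChar (PySem.List.pyGetD s i ' ')]) [])

-- ===== PORT B =====
-- B's while loop: state (out, i); i only ever takes the values 0, 2, 4, …, so it is carried as a Nat
def pvGo (s : List Char) (out : List (List Char)) (i : Nat) : List (List Char) × Nat :=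
  if i + 1 < s.length then
    pvGo s
      (out ++ [[PySem.List.pyGetD s (i : Int) ' ',
                PySem.Chars.upperChar (PySem.List.pyGetD s ((i : Int) + 1) ' ')]])
      (i + 2)
  else (out, i)
termination_by s.length - i

def alternate_character_casing_alt (input_string : String) : String :=
  let s := PySem.Chars.lower input_string.toList
  let r := pvGo s [] 0
  String.ofList (r.1.flatten ++ PySem.List.slice s (some (r.2 : Int)) none)

-- ===== PRECONDITION & SPEC =====
def Spec_alternate_character_casing (input_string : String) (out : String) : Prop := out = alternate_character_casing_alt input_string
instance (input_string : String) (out : String) : Decidable (Spec_alternate_character_casing input_string out) := by unfold Spec_alternate_character_casing; infer_instance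

-- ===== CLAIM (what is proved, stated in full; the proofs are below) =====
def Claim_equal_alternate_character_casing : Prop := ∀ (input_string : String), Dom_alternate_character_casing input_string → Spec_alternate_character_casing input_string (alternate_character_casing input_string)

-- ===== LEMMAS AND PROOFS =====

-- the per-index character A's loop emits, over Nat indices
def pvF (t : List Char) (k : Nat) : Char :=
  if k % 2 = 0 then PySem.Chars.lowerChar (t.getD k ' ')
  else PySem.Chars.upperChar (t.getD k ' ')

def pvAList (t : List Char) : List Char := (List.range t.length).map (pvF t)

-- the common pairwise specification both programs compute (on an already-lowercased list)
def pvPW : List Char → List Char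
  | [] => []
  | [x] => [x]
  | x :: y :: r => x :: PySem.Chars.upperChar y :: pvPW r

theorem pvLowerChar_idem (c : Char) :
    PySem.Chars.lowerChar (PySem.Chars.lowerChar c) = PySem.Chars.lowerChar c := by
  simp only [PySem.Chars.lowerChar, PySem.Chars.isupper]
  by_cases h : ('A' ≤ c ∧ c ≤ 'Z')
  · have h1 : (65:Nat) ≤ c.toNat := h.1
    have h2 : c.toNat ≤ 90 := h.2
    have hv : (c.toNat + 32).isValidChar := by left; omega
    have ht : (Char.ofNat (c.toNat + 32)).toNat = c.toNat + 32 := by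
      rw [Char.toNat_ofNat]; simp [hv]
    simp only [h.1, h.2, decide_true, Bool.and_self, if_true]
    have hno : ¬ ((decide ('A' ≤ Char.ofNat (c.toNat + 32)) && decide (Char.ofNat (c.toNat + 32) ≤ 'Z')) = true) := by
      simp only [Bool.and_eq_true, decide_eq_true_iff]
      intro hc
      have : (Char.ofNat (c.toNat + 32)).toNat ≤ 90 := hc.2
      omega
    simp [hno]
  · have hno : ¬ ((decide ('A' ≤ c) && decide (c ≤ 'Z')) = true) := by
      simp only [Bool.and_eq_true, decide_eq_true_iff]; exact h
    simp [hno]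

theorem pvAList_cons2 (x y : Char) (r : List Char) :
    pvAList (x :: y :: r)
      = PySem.Chars.lowerChar x :: PySem.Chars.upperChar y :: pvAList r := by
  simp only [pvAList, List.length_cons]
  rw [List.range_succ_eq_map, List.range_succ_eq_map]
  simp only [List.map_cons, List.map_map]
  refine congrArg₂ _ ?_ (congrArg₂ _ ?_ ?_)
  · simp [pvF]
  · simp [pvF]
  · apply List.map_congr_left
    intro k _
    simp only [pvF, Function.comp]
    have hm : (k + 1 + 1) % 2 = k % 2 := by omega
    rw [hm]
    simp [List.getD]

theorem pvAList_eq_pvPW (t : List Char)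
    (h : ∀ c ∈ t, PySem.Chars.lowerChar c = c) : pvAList t = pvPW t := by
  induction t using pvPW.induct with
  | case1 => simp [pvAList, pvPW]
  | case2 x =>
    simp only [pvPW, pvAList, List.length_cons, List.length_nil]
    simp [pvF, h x (by simp)]
  | case3 x y r ih =>
    rw [pvAList_cons2, pvPW, h x (by simp)]
    rw [ih (fun c hc => h c (by simp [hc]))]

theorem pvPW_short (t : List Char) (h : t.length ≤ 1) : pvPW t = t := by
  match t, h with
  | [], _ => rfl
  | [x], _ => rfl

theorem pvDrop_two (t : List Char) (i : Nat) (h : i + 1 < t.length) :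
    t.drop i = t[i] :: t[i+1] :: t.drop (i + 2) := by
  rw [List.drop_eq_getElem_cons (by omega)]
  rw [List.drop_eq_getElem_cons (by omega)]

theorem pvGo_spec_aux (t : List Char) (n : Nat) : ∀ (i : Nat) (out : List (List Char)),
    t.length - i ≤ n →
    (pvGo t out i).1.flatten ++ PySem.List.slice t (some (((pvGo t out i).2 : Nat) : Int)) none
      = out.flatten ++ pvPW (t.drop i) := by
  induction n with
  | zero =>
    intro i out hn
    rw [pvGo, if_neg (by omega)]
    simp only
    rw [PySem.List.slice_from_natCast]
    rw [pvPW_short (t := t.drop i) (by simp; omega)]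
  | succ n ih =>
    intro i out hn
    by_cases h : i + 1 < t.length
    · rw [pvGo, if_pos h]
      rw [ih (i + 2) _ (by omega)]
      rw [pvDrop_two t i h, pvPW]
      have g1 : PySem.List.pyGetD t (i : Int) ' ' = t[i] :=
        PySem.List.pyGetD_ofNat t i ' ' (by omega)
      have g2 : PySem.List.pyGetD t ((i : Int) + 1) ' ' = t[i+1] := by
        rw [show ((i : Int) + 1) = ((i+1 : Nat) : Int) by push_cast; ring]
        exact PySem.List.pyGetD_ofNat t (i+1) ' ' (by omega)
      simp [g1, g2]
    · rw [pvGo, if_neg h]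
      simp only
      rw [PySem.List.slice_from_natCast]
      rw [pvPW_short (t := t.drop i) (by simp; omega)]

theorem pvGo_spec (t : List Char) :
    (pvGo t [] 0).1.flatten ++ PySem.List.slice t (some (((pvGo t [] 0).2 : Nat) : Int)) none
      = pvPW t := by
  have := pvGo_spec_aux t t.length 0 [] (by omega)
  simpa using this

theorem pvA_eq (input_string : String) :
    alternate_character_casing input_string
      = String.ofList (pvAList (PySem.Chars.lower input_string.toList)) := by
  unfold alternate_character_casing
  simp only
  congr 1
  have hfun : (fun (result_string : List Char) (i : Int) =>
      if PySem.Int.mod i 2 = 0 then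
        result_string ++ [PySem.Chars.lowerChar (PySem.List.pyGetD (PySem.Chars.lower input_string.toList) i ' ')]
      else
        result_string ++ [PySem.Chars.upperChar (PySem.List.pyGetD (PySem.Chars.lower input_string.toList) i ' ')])
      = (fun (result_string : List Char) (i : Int) => result_string ++
          [if PySem.Int.mod i 2 = 0 then
             PySem.Chars.lowerChar (PySem.List.pyGetD (PySem.Chars.lower input_string.toList) i ' ')
           else
             PySem.Chars.upperChar (PySem.List.pyGetD (PySem.Chars.lower input_string.toList) i ' ')]) := by
    funext acc i; split <;> rfl
  rw [hfun, PySem.Chars.len_eq, PySem.List.pyRange_zero_natCast,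
      PySem.List.foldl_append_singleton_eq_map]
  simp only [List.nil_append, List.map_map]
  unfold pvAList
  apply List.map_congr_left
  intro k hk
  simp only [Function.comp, PySem.List.pyGetD_natCast]
  have hm : PySem.Int.mod (k : Int) 2 = ((k % 2 : Nat) : Int) := PySem.Int.mod_natCast k 2
  rw [hm, pvF]
  by_cases h2 : k % 2 = 0
  · simp [h2]
  · rw [if_neg (by omega : ¬ ((k % 2 : Nat) : Int) = 0), if_neg h2]

theorem pvLower_fixed (l : List Char) :
    ∀ c ∈ PySem.Chars.lower l, PySem.Chars.lowerChar c = c := by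
  intro c hc
  simp only [PySem.Chars.lower, List.mem_map] at hc
  obtain ⟨a, -, rfl⟩ := hc
  exact pvLowerChar_idem a

-- ===== VERDICT (by name: the statement is the Claim_ definition above) =====
theorem alternate_character_casing_spec : Claim_equal_alternate_character_casing := by
  intro input_string _
  unfold Spec_alternate_character_casing
  rw [pvA_eq]
  unfold alternate_character_casing_alt
  simp only
  congr 1
  rw [pvGo_spec]
  exact pvAList_eq_pvPW _ (pvLower_fixed input_string.toList)
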